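-- pv_equiv track=rewrite | github.com/zentralopensource/zentral | zentral/contrib/inventory/conf.py | platform_with_os_name
-- ===== SOURCE A (Python) =====
-- LINUX = "LINUX"
--
-- MACOS = "MACOS"
--
-- WINDOWS = "WINDOWS"
--
-- ANDROID = "ANDROID"
--
-- IOS = "IOS"
--
-- IPADOS = "IPADOS"
--
-- TVOS = "TVOS"
--
-- def platform_with_os_name(os_name):
--     if not os_name:
--         return
--     os_name = os_name.lower().replace(" ", "")
--     if "macos" in os_name or "osx" in os_name:
--         return MACOS
--     elif "ios" in os_name:
--         return IOS
--     elif "ipados" in os_name: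
--         return IPADOS
--     elif "tvos" in os_name:
--         return TVOS
--     elif "windows" in os_name:
--         return WINDOWS
--     elif "android" in os_name:
--         return ANDROID
--     else:
--         for distro in ('centos', 'fedora', 'redhat', 'rehl',
--                        'debian', 'ubuntu',
--                        'gentoo',
--                        'linux'):
--             if distro in os_name:
--                 return LINUX
-- ===== SOURCE B (Python) =====
-- LINUX = "LINUX"
-- MACOS = "MACOS"
-- WINDOWS = "WINDOWS"
-- ANDROID = "ANDROID"
-- IOS = "IOS"
-- IPADOS = "IPADOS"
-- TVOS = "TVOS"
--
-- # keyword -> priority rank (lower rank wins, same priority order as the spec)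
-- _KEYWORD_RANK = (
--     ("macos", 0), ("osx", 0),
--     ("ios", 1), ("ipados", 2), ("tvos", 3),
--     ("windows", 4), ("android", 5),
--     ("centos", 6), ("fedora", 6), ("redhat", 6), ("rehl", 6),
--     ("debian", 6), ("ubuntu", 6), ("gentoo", 6), ("linux", 6),
-- )
-- _PLATFORMS = (MACOS, IOS, IPADOS, TVOS, WINDOWS, ANDROID, LINUX)
--
--
-- def platform_with_os_name(os_name):
--     if not os_name:
--         return
--     os_name = os_name.lower().replace(" ", "")
--     # one left-to-right scan over the string: collect the ranks of every
--     # keyword that starts at some position, then pick the best rank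
--     found = set()
--     for i in range(len(os_name)):
--         for kw, rank in _KEYWORD_RANK:
--             if os_name.startswith(kw, i):
--                 found.add(rank)
--     for rank in range(7):
--         if rank in found:
--             return _PLATFORMS[rank]
-- ===== Notes on version B (the rewrite author's own statement) =====
-- stated objective: alternative
-- what changed: Instead of A's keyword-priority branch cascade of substring searches, B makes one left-to-right scan over the string's positions collecting into a set the priority ranks of every keyword that starts there, then returns the platform of the smallest collected rank.
import Mathlib
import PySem

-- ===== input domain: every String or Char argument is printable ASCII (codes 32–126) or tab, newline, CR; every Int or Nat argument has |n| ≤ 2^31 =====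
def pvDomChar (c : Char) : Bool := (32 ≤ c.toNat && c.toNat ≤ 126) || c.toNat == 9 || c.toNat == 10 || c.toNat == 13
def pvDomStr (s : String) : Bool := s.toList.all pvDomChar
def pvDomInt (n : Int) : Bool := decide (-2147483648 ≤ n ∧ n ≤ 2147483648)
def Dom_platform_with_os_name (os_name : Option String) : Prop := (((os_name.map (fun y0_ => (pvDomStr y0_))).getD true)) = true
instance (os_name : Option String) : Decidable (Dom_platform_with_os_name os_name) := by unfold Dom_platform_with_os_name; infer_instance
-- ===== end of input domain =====

-- B replaces the keyword-priority branch cascade by one scan over the string's positions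
-- collecting the set of matched priority ranks, then a priority pass over that set ("alternative").
-- ===== PORT A =====
def platform_with_os_name (os_name : Option String) : Option String :=
  match os_name with
  | none => none
  | some s =>
    if s = "" then none
    else
      let os := PySem.Str.replace (PySem.Str.lower s) " " ""
      if PySem.Str.isIn "macos" os || PySem.Str.isIn "osx" os then some "MACOS"
      else if PySem.Str.isIn "ios" os then some "IOS"
      else if PySem.Str.isIn "ipados" os then some "IPADOS"
      else if PySem.Str.isIn "tvos" os then some "TVOS"
      else if PySem.Str.isIn "windows" os then some "WINDOWS"
      else if PySem.Str.isIn "android" os then some "ANDROID"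
      else
        -- the for-loop over the distro tuple, unrolled as first-match recursion
        (["centos", "fedora", "redhat", "rehl", "debian", "ubuntu", "gentoo", "linux"].find?
          (fun distro => PySem.Str.isIn distro os)).map (fun _ => "LINUX")

-- ===== PORT B =====
def pvKeywordRank : List (String × Nat) :=
  [("macos", 0), ("osx", 0),
   ("ios", 1), ("ipados", 2), ("tvos", 3),
   ("windows", 4), ("android", 5),
   ("centos", 6), ("fedora", 6), ("redhat", 6), ("rehl", 6),
   ("debian", 6), ("ubuntu", 6), ("gentoo", 6), ("linux", 6)]

def pvPlatforms : List String :=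
  ["MACOS", "IOS", "IPADOS", "TVOS", "WINDOWS", "ANDROID", "LINUX"]

-- the collecting loop of B: for i in range(len(os_name)): for kw, rank in _KEYWORD_RANK:
--   if os_name.startswith(kw, i): found.add(rank)
-- (os_name.startswith(kw, i) with 0 ≤ i < len(os_name) is exactly: kw is a prefix of the drop-i suffix)
def pvFound (t : List Char) : PySem.Set Nat :=
  (List.range t.length).foldl
    (fun found i =>
      pvKeywordRank.foldl
        (fun found kp =>
          if PySem.Chars.startswith (t.drop i) kp.1.toList then PySem.Set.add found kp.2
          else found)
        found)
    (PySem.Set.empty)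

def platform_with_os_name_alt (os_name : Option String) : Option String :=
  match os_name with
  | none => none
  | some s =>
    if s = "" then none
    else
      let t := (PySem.Str.replace (PySem.Str.lower s) " " "").toList
      -- for rank in range(7): if rank in found: return _PLATFORMS[rank]
      ((List.range 7).find? (fun rank => PySem.Set.contains (pvFound t) rank)).bind
        (fun rank => pvPlatforms[rank]?)

-- ===== PRECONDITION & SPEC =====
def Spec_platform_with_os_name (os_name : Option String) (out : Option String) : Prop := out = platform_with_os_name_alt os_name
instance (os_name : Option String) (out : Option String) : Decidable (Spec_platform_with_os_name os_name out) := by unfold Spec_platform_with_os_name; infer_instance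

-- ===== CLAIM (what is proved, stated in full; the proofs are below) =====
def Claim_equal_platform_with_os_name : Prop := ∀ (os_name : Option String), Dom_platform_with_os_name os_name → Spec_platform_with_os_name os_name (platform_with_os_name os_name)

-- ===== LEMMAS AND PROOFS =====

theorem pv_kw_ne_nil : ∀ kp ∈ pvKeywordRank, kp.1.toList ≠ [] := by decide

-- membership in a fold that conditionally adds to a PySem.Set
theorem pv_mem_foldl_add_if {α β : Type} [BEq β] [LawfulBEq β]
    (l : List α) (c : α → Bool) (f : α → β) :
    ∀ (s : List β) (y : β),
      (y ∈ l.foldl (fun s x => if c x then PySem.Set.add s (f x) else s) s) ↔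
        (y ∈ s ∨ ∃ x ∈ l, c x = true ∧ y = f x) := by
  induction l with
  | nil => intro s y; simp
  | cons a l ih =>
    intro s y
    simp only [List.foldl_cons, ih, List.mem_cons]
    by_cases h : c a
    · simp only [h, if_true, PySem.Set.mem_add]
      constructor
      · rintro ((hy | hy) | ⟨x, hx, hc, hf⟩)
        · exact Or.inl hy
        · exact Or.inr ⟨a, Or.inl rfl, h, hy⟩
        · exact Or.inr ⟨x, Or.inr hx, hc, hf⟩
      · rintro (hy | ⟨x, (rfl | hx), hc, hf⟩)
        · exact Or.inl (Or.inl hy)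
        · exact Or.inl (Or.inr hf)
        · exact Or.inr ⟨x, hx, hc, hf⟩
    · simp only [h]
      constructor
      · rintro (hy | ⟨x, hx, hc, hf⟩)
        · exact Or.inl hy
        · exact Or.inr ⟨x, Or.inr hx, hc, hf⟩
      · rintro (hy | ⟨x, (rfl | hx), hc, hf⟩)
        · exact Or.inl hy
        · exact absurd hc h
        · exact Or.inr ⟨x, hx, hc, hf⟩

-- membership in the nested position × keyword fold
theorem pv_mem_foldl_nested {α β γ : Type} [BEq γ] [LawfulBEq γ]
    (l : List α) (K : List β) (c : α → β → Bool) (f : β → γ) :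
    ∀ (s : List γ) (y : γ),
      (y ∈ l.foldl (fun s i => K.foldl (fun s x => if c i x then PySem.Set.add s (f x) else s) s) s) ↔
        (y ∈ s ∨ ∃ i ∈ l, ∃ x ∈ K, c i x = true ∧ y = f x) := by
  induction l with
  | nil => intro s y; simp
  | cons a l ih =>
    intro s y
    simp only [List.foldl_cons, ih, pv_mem_foldl_add_if, List.mem_cons]
    constructor
    · rintro ((hy | ⟨x, hx, hc, hf⟩) | ⟨i, hi, x, hx, hc, hf⟩)
      · exact Or.inl hy
      · exact Or.inr ⟨a, Or.inl rfl, x, hx, hc, hf⟩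
      · exact Or.inr ⟨i, Or.inr hi, x, hx, hc, hf⟩
    · rintro (hy | ⟨i, (rfl | hi), x, hx, hc, hf⟩)
      · exact Or.inl (Or.inl hy)
      · exact Or.inl (Or.inr ⟨x, hx, hc, hf⟩)
      · exact Or.inr ⟨i, hi, x, hx, hc, hf⟩

-- a nonempty keyword starts at some position i < len(t) iff it is a substring of t
theorem pv_occ_iff (kw : List Char) (h : kw ≠ []) (t : List Char) :
    (∃ i ∈ List.range t.length, PySem.Chars.startswith (t.drop i) kw = true) ↔
      PySem.Chars.isIn kw t = true := by
  rw [← PySem.Chars.exists_prefix_drop_iff_isIn]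
  constructor
  · rintro ⟨i, -, hi⟩
    exact ⟨i, (PySem.Chars.startswith_iff _ _).mp hi⟩
  · rintro ⟨j, hj⟩
    by_cases hlt : j < t.length
    · exact ⟨j, List.mem_range.mpr hlt, (PySem.Chars.startswith_iff _ _).mpr hj⟩
    · exfalso
      have : t.drop j = [] := List.drop_eq_nil_of_le (by omega)
      rw [this] at hj
      exact h (List.prefix_nil.mp hj)

-- (l.find? p).map (fun _ => c): Some c iff some element satisfies p
theorem pv_find?_map_const {α : Type} (l : List α) (p : α → Bool) (c : String) :
    ((l.find? p).map (fun _ => c)) = if l.any p then some c else none := by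
  induction l with
  | nil => rfl
  | cons a l ih =>
    by_cases h : p a
    · simp [List.any_cons, h]
    · simp [List.any_cons, h, ih]

-- ===== VERDICT (by name: the statement is the Claim_ definition above) =====
theorem platform_with_os_name_spec : Claim_equal_platform_with_os_name := by
  intro os_name _
  unfold Spec_platform_with_os_name platform_with_os_name platform_with_os_name_alt
  cases os_name with
  | none => rfl
  | some s =>
    by_cases hs : s = ""
    · simp [hs]
    · simp only [if_neg hs, PySem.Str.isIn_eq]
      generalize (PySem.Str.replace (PySem.Str.lower s) " " "").toList = t
      have hmem : ∀ p : ℕ,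
          (p ∈ pvFound t) ↔
          ∃ kp ∈ pvKeywordRank, PySem.Chars.isIn kp.1.toList t = true ∧ p = kp.2 := by
        intro p
        unfold pvFound
        rw [pv_mem_foldl_nested (List.range t.length) pvKeywordRank
            (fun i kp => PySem.Chars.startswith (t.drop i) kp.1.toList) (fun kp => kp.2)]
        constructor
        · rintro (h | ⟨i, hi, kp, hkp, hc, rfl⟩)
          · exact absurd h (by simp [PySem.Set.empty])
          · exact ⟨kp, hkp, (pv_occ_iff kp.1.toList (pv_kw_ne_nil kp hkp) t).mp ⟨i, hi, hc⟩, rfl⟩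
        · rintro ⟨kp, hkp, hin, rfl⟩
          obtain ⟨i, hi, hc⟩ := (pv_occ_iff kp.1.toList (pv_kw_ne_nil kp hkp) t).mpr hin
          exact Or.inr ⟨i, hi, kp, hkp, hc, rfl⟩
      have hc : ∀ p : ℕ, PySem.Set.contains (pvFound t) p =
          pvKeywordRank.any (fun kp => (p == kp.2) && PySem.Chars.isIn kp.1.toList t) := by
        intro p
        rw [Bool.eq_iff_iff, PySem.Set.contains_iff, hmem, List.any_eq_true]
        constructor
        · rintro ⟨kp, hkp, hin, rfl⟩
          exact ⟨kp, hkp, by simp [hin]⟩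
        · rintro ⟨kp, hkp, hb⟩
          simp only [Bool.and_eq_true, beq_iff_eq] at hb
          exact ⟨kp, hkp, hb.2, hb.1⟩
      have hr : List.range 7 = [0, 1, 2, 3, 4, 5, 6] := by decide
      simp only [hc, pv_find?_map_const]
      simp only [hr, pvKeywordRank, List.any_cons, List.any_nil, List.find?,
        Nat.reduceBEq, Bool.false_and, Bool.true_and, Bool.false_or, Bool.or_false]
      generalize PySem.Chars.isIn "macos".toList t = b0
      generalize PySem.Chars.isIn "osx".toList t = b1
      generalize PySem.Chars.isIn "ios".toList t = b2
      generalize PySem.Chars.isIn "ipados".toList t = b3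
      generalize PySem.Chars.isIn "tvos".toList t = b4
      generalize PySem.Chars.isIn "windows".toList t = b5
      generalize PySem.Chars.isIn "android".toList t = b6
      generalize PySem.Chars.isIn "centos".toList t = b7
      generalize PySem.Chars.isIn "fedora".toList t = b8
      generalize PySem.Chars.isIn "redhat".toList t = b9
      generalize PySem.Chars.isIn "rehl".toList t = b10
      generalize PySem.Chars.isIn "debian".toList t = b11
      generalize PySem.Chars.isIn "ubuntu".toList t = b12
      generalize PySem.Chars.isIn "gentoo".toList t = b13
      generalize PySem.Chars.isIn "linux".toList t = b14
      generalize hbl : (b7 || (b8 || (b9 || (b10 || (b11 || (b12 || (b13 || b14))))))) = bL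
      clear hbl
      revert b0 b1 b2 b3 b4 b5 b6 bL
      decide
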